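-- pv_equiv track=rewrite | github.com/MrBrantCode/unitest_baseline | mut_generate/mist_train_taco/taco_1057/solution.py | min_operations_to_symmetric_grid
-- ===== SOURCE A (Python) =====
-- def min_operations_to_symmetric_grid(grid, n):
--     """
--     Calculate the minimum number of operations needed to make the grid look the same
--     under 0°, 90°, 180°, and 270° rotations.
--
--     Parameters:
--     - grid (list of str): A list of strings where each string represents a row in the grid.
--     - n (int): The size of the grid (number of rows and columns).
--
--     Returns:
--     - int: The minimum number of operations needed.
--     """
--     def count_flips(j, k):
--         b = 0
--         if grid[j][k] == '1':
--             b += 1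
--         if grid[n - 1 - k][j] == '1':
--             b += 1
--         if grid[n - 1 - j][n - 1 - k] == '1':
--             b += 1
--         if grid[k][n - 1 - j] == '1':
--             b += 1
--         return b
--
--     ans = 0
--     if n % 2 == 1:
--         # Odd case
--         for j in range(int((n + 1) / 2)):
--             for k in range(int((n - 1) / 2)):
--                 b = count_flips(j, k)
--                 if b == 1 or b == 3:
--                     ans += 1
--                 elif b == 2:
--                     ans += 2
--     else:
--         # Even case
--         for j in range(int(n / 2)):
--             for k in range(int(n / 2)):
--                 b = count_flips(j, k)
--                 if b == 1 or b == 3: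
--                     ans += 1
--                 elif b == 2:
--                     ans += 2
--
--     return ans
-- ===== SOURCE B (Python) =====
-- def min_operations_to_symmetric_grid(grid, n):
--     """Full-grid scan: add min(b, 4-b) per cell (b = ones on the cell's rotation
--     orbit); every size-4 orbit is visited 4 times and the odd-n center
--     contributes 0, so the total divided by 4 is the answer."""
--     total = 0
--     for i in range(n):
--         for j in range(n):
--             b = sum(1 for r, c in ((i, j), (n - 1 - j, i), (n - 1 - i, n - 1 - j), (j, n - 1 - i))
--                     if grid[r][c] == '1')
--             total += min(b, 4 - b)
--     return total // 4
-- ===== Notes on version B (the rewrite author's own statement) =====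
-- stated objective: alternative
-- what changed: B replaces A's odd/even case split with two quadrant loops by a single uniform scan of all n^2 cells that adds min(b, 4-b) per cell (b = ones on the cell's rotation orbit) and divides the grand total by 4, since every size-4 orbit is visited exactly four times and the odd-n center contributes 0.
-- outside the precondition, e.g. on min_operations_to_symmetric_grid([], 1): A returns 0, B raises IndexError
import Mathlib
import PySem

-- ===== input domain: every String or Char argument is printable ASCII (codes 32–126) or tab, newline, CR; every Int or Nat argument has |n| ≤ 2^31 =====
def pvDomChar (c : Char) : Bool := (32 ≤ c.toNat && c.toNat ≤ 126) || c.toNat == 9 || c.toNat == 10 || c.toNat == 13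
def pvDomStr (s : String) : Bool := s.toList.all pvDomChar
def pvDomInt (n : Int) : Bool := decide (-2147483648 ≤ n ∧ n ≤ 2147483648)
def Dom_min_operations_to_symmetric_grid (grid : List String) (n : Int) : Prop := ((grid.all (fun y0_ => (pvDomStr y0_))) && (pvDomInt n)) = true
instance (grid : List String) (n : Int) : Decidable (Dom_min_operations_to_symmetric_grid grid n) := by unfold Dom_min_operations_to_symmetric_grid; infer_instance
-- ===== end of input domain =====

-- B replaces A's odd/even quadrant case split by one uniform full-grid scan adding
-- min(b, 4-b) per cell and dividing the total by 4 (alternative decomposition, same cost).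


-- ===== PORT A =====
-- grid[i][j] read as an Option Char (none exactly where Python raises IndexError)
def pvCellA (grid : List String) (i j : Int) : Option Char :=
  match PySem.List.pyGet? grid i with
  | some s => PySem.Str.pyGet? s j
  | none => none

-- A's nested helper count_flips(j, k): the four sequential `if … : b += 1` steps
def pvCountFlips (grid : List String) (n j k : Int) : Int :=
  (((0 + (if pvCellA grid j k = some '1' then 1 else 0))
    + (if pvCellA grid (n - 1 - k) j = some '1' then 1 else 0))
    + (if pvCellA grid (n - 1 - j) (n - 1 - k) = some '1' then 1 else 0))
    + (if pvCellA grid k (n - 1 - j) = some '1' then 1 else 0)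

def min_operations_to_symmetric_grid (grid : List String) (n : Int) : Int :=
  if PySem.Int.mod n 2 = 1 then
    -- odd case: int((n+1)/2) and int((n-1)/2) are exact divisions (n odd)
    (PySem.List.pyRange 0 ((n + 1) / 2) 1).foldl (fun ans j =>
      (PySem.List.pyRange 0 ((n - 1) / 2) 1).foldl (fun ans k =>
        let b := pvCountFlips grid n j k
        if b = 1 ∨ b = 3 then ans + 1 else if b = 2 then ans + 2 else ans) ans) 0
  else
    -- even case: int(n/2) is exact (n even)
    (PySem.List.pyRange 0 (n / 2) 1).foldl (fun ans j =>
      (PySem.List.pyRange 0 (n / 2) 1).foldl (fun ans k =>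
        let b := pvCountFlips grid n j k
        if b = 1 ∨ b = 3 then ans + 1 else if b = 2 then ans + 2 else ans) ans) 0

-- ===== PORT B =====
def pvCellB (grid : List String) (r c : Int) : Option Char :=
  (PySem.List.pyGet? grid r).bind (fun s => PySem.Str.pyGet? s c)

-- B's generator-sum: ones among the four rotation positions of (i, j)
def pvOrbitOnes (grid : List String) (n i j : Int) : Int :=
  (([(i, j), (n - 1 - j, i), (n - 1 - i, n - 1 - j), (j, n - 1 - i)].countP
      (fun p => pvCellB grid p.1 p.2 == some '1') : Nat) : Int)

def min_operations_to_symmetric_grid_alt (grid : List String) (n : Int) : Int :=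
  PySem.Int.floordiv
    ((PySem.List.pyRange 0 n 1).foldl (fun tot i =>
      (PySem.List.pyRange 0 n 1).foldl (fun tot j =>
        let b := pvOrbitOnes grid n i j
        tot + min b (4 - b)) tot) 0) 4

-- ===== PRECONDITION & SPEC =====
-- Pre_ excludes exactly the inputs where Python raises IndexError: for n ≥ 1 the grid must
-- have at least n rows whose first n each have length ≥ n.  For n ≥ 2 A itself raises
-- there; the only excluded inputs on which A still returns are n = 1 with a missing/empty
-- first row, where A's 0 comes from its empty loop while B reads grid[0][0] and raises.
def Pre_min_operations_to_symmetric_grid (grid : List String) (n : Int) : Prop :=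
  n ≤ 0 ∨ (n ≤ grid.length ∧ ∀ s ∈ grid.take n.toNat, n ≤ PySem.Str.len s)
instance (grid : List String) (n : Int) : Decidable (Pre_min_operations_to_symmetric_grid grid n) := by unfold Pre_min_operations_to_symmetric_grid; infer_instance

def pvWitness_min_operations_to_symmetric_grid : List String × Int := (["010", "111", "010"], 3)

def Spec_min_operations_to_symmetric_grid (grid : List String) (n : Int) (out : Int) : Prop := out = min_operations_to_symmetric_grid_alt grid n
instance (grid : List String) (n : Int) (out : Int) : Decidable (Spec_min_operations_to_symmetric_grid grid n out) := by unfold Spec_min_operations_to_symmetric_grid; infer_instance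

-- ===== CLAIM (what is proved, stated in full; the proofs are below) =====
def Claim_equal_min_operations_to_symmetric_grid : Prop := ∀ (grid : List String) (n : Int), Dom_min_operations_to_symmetric_grid grid n → Pre_min_operations_to_symmetric_grid grid n → Spec_min_operations_to_symmetric_grid grid n (min_operations_to_symmetric_grid grid n)

-- ===== LEMMAS AND PROOFS =====

-- per-cell cost as A computes it
def pvCost (grid : List String) (n i j : Int) : Int :=
  if pvCountFlips grid n i j = 1 ∨ pvCountFlips grid n i j = 3 then 1
  else if pvCountFlips grid n i j = 2 then 2 else 0

lemma pvCellAB (grid : List String) (i j : Int) : pvCellA grid i j = pvCellB grid i j := by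
  unfold pvCellA pvCellB
  cases PySem.List.pyGet? grid i <;> rfl

lemma orbitOnes_eq (grid : List String) (n i j : Int) :
    pvOrbitOnes grid n i j = pvCountFlips grid n i j := by
  unfold pvOrbitOnes pvCountFlips
  simp only [List.countP_cons, List.countP_nil, pvCellAB]
  by_cases h1 : pvCellB grid i j = some '1' <;>
  by_cases h2 : pvCellB grid (n - 1 - j) i = some '1' <;>
  by_cases h3 : pvCellB grid (n - 1 - i) (n - 1 - j) = some '1' <;>
  by_cases h4 : pvCellB grid j (n - 1 - i) = some '1' <;>
  simp [h1, h2, h3, h4]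

lemma countFlips_bounds (grid : List String) (n i j : Int) :
    0 ≤ pvCountFlips grid n i j ∧ pvCountFlips grid n i j ≤ 4 := by
  unfold pvCountFlips
  split_ifs <;> omega

lemma min_eq_cost (grid : List String) (n i j : Int) :
    min (pvOrbitOnes grid n i j) (4 - pvOrbitOnes grid n i j) = pvCost grid n i j := by
  rw [orbitOnes_eq]
  unfold pvCost
  rcases countFlips_bounds grid n i j with ⟨h0, h4⟩
  rcases (show pvCountFlips grid n i j = 0 ∨ pvCountFlips grid n i j = 1 ∨
      pvCountFlips grid n i j = 2 ∨ pvCountFlips grid n i j = 3 ∨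
      pvCountFlips grid n i j = 4 by omega) with h | h | h | h | h <;> rw [h] <;> decide

-- rotation invariance of the per-cell cost (a pure algebraic identity)
lemma cost_rot (grid : List String) (n i j : Int) :
    pvCost grid n (n - 1 - j) i = pvCost grid n i j := by
  have hb : pvCountFlips grid n (n - 1 - j) i = pvCountFlips grid n i j := by
    unfold pvCountFlips
    have h1 : n - 1 - (n - 1 - j) = j := by ring
    rw [h1]; ring
  unfold pvCost; rw [hb]

-- the odd-n center cell costs 0
lemma cost_center (grid : List String) (m : Int) :
    pvCost grid (2 * m + 1) m m = 0 := by
  have h1 : 2 * m + 1 - 1 - m = m := by ring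
  unfold pvCost pvCountFlips
  rw [h1]
  by_cases h : pvCellA grid m m = some '1' <;> simp [h]

lemma ico_split (g : ℤ → ℤ) (a b c : ℤ) (h1 : a ≤ b) (h2 : b ≤ c) :
    ∑ i ∈ Finset.Ico a c, g i = (∑ i ∈ Finset.Ico a b, g i) + ∑ i ∈ Finset.Ico b c, g i := by
  rw [← Finset.sum_union (Finset.Ico_disjoint_Ico_consecutive a b c),
    Finset.Ico_union_Ico_eq_Ico h1 h2]

lemma ico_one (g : ℤ → ℤ) (b : ℤ) : ∑ i ∈ Finset.Ico b (b + 1), g i = g b := by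
  rw [show Finset.Ico b (b + 1) = {b} by ext x; simp [Finset.mem_Ico]; omega,
    Finset.sum_singleton]

lemma sum_map_pyRange (g : ℤ → ℤ) (t : ℤ) :
    ((PySem.List.pyRange 0 t 1).map g).sum = ∑ i ∈ Finset.Ico (0 : ℤ) t, g i := by
  have key : ∀ k : ℕ, ((PySem.List.pyRange 0 (k : ℤ) 1).map g).sum
      = ∑ i ∈ Finset.Ico (0 : ℤ) (k : ℤ), g i := by
    intro k
    induction k with
    | zero => simp [PySem.List.pyRange_one_eq_nil (by omega : (0 : ℤ) ≤ 0)]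
    | succ p ih =>
        rw [show ((p + 1 : ℕ) : ℤ) = (p : ℤ) + 1 by push_cast; ring,
          PySem.List.pyRange_one_succ_right (by positivity), List.map_append,
          List.sum_append, ih, ico_split g 0 (p : ℤ) ((p : ℤ) + 1) (by positivity) (by omega),
          ico_one]
        simp
  by_cases h : 0 ≤ t
  · have := key t.toNat
    rwa [Int.toNat_of_nonneg h] at this
  · rw [PySem.List.pyRange_one_eq_nil (by omega), Finset.Ico_eq_empty (by omega)]
    simp

lemma double_loop (g : ℤ → ℤ → ℤ) (J K : ℤ) :
    (PySem.List.pyRange 0 J 1).foldl (fun ans j =>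
      (PySem.List.pyRange 0 K 1).foldl (fun ans k => ans + g j k) ans) 0
      = ∑ j ∈ Finset.Ico (0 : ℤ) J, ∑ k ∈ Finset.Ico (0 : ℤ) K, g j k := by
  have hinner : ∀ (init j : ℤ),
      (PySem.List.pyRange 0 K 1).foldl (fun a k => a + g j k) init
        = init + ∑ k ∈ Finset.Ico (0 : ℤ) K, g j k := by
    intro init j
    rw [PySem.List.foldl_add, sum_map_pyRange]
  calc (PySem.List.pyRange 0 J 1).foldl (fun ans j =>
          (PySem.List.pyRange 0 K 1).foldl (fun ans k => ans + g j k) ans) 0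
      = (PySem.List.pyRange 0 J 1).foldl
          (fun ans j => ans + ∑ k ∈ Finset.Ico (0 : ℤ) K, g j k) 0 := by
        exact PySem.List.foldl_congr_mem _ _ _ _ (fun acc j _ => hinner acc j)
    _ = 0 + ∑ j ∈ Finset.Ico (0 : ℤ) J, ∑ k ∈ Finset.Ico (0 : ℤ) K, g j k := by
        rw [PySem.List.foldl_add, sum_map_pyRange]
    _ = _ := zero_add _

-- image of the rectangle [a,b) × [c,d) under the rotation (i,j) ↦ (n-1-j, i)
lemma rect_rot (f : ℤ → ℤ → ℤ) (n : ℤ) (hrot : ∀ i j, f (n - 1 - j) i = f i j)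
    (a b c d : ℤ) :
    ∑ i ∈ Finset.Ico (n - d) (n - c), ∑ j ∈ Finset.Ico a b, f i j
      = ∑ i ∈ Finset.Ico a b, ∑ j ∈ Finset.Ico c d, f i j := by
  rw [← Finset.sum_product', ← Finset.sum_product']
  refine Finset.sum_nbij' (fun p => (p.2, n - 1 - p.1)) (fun p => (n - 1 - p.2, p.1))
    ?_ ?_ ?_ ?_ ?_
  · intro p hp
    simp only [Finset.mem_product, Finset.mem_Ico] at hp ⊢
    omega
  · intro p hp
    simp only [Finset.mem_product, Finset.mem_Ico] at hp ⊢
    omega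
  · intro p _; simp
  · intro p _; simp
  · intro p hp
    have := hrot p.2 (n - 1 - p.1)
    simp only at this ⊢
    rw [show n - 1 - (n - 1 - p.1) = p.1 by ring] at this
    exact this

lemma quad_odd (f : ℤ → ℤ → ℤ) (m : ℤ) (hm : 0 ≤ m)
    (hrot : ∀ i j, f (2 * m + 1 - 1 - j) i = f i j) (hc : f m m = 0) :
    ∑ i ∈ Finset.Ico (0 : ℤ) (2 * m + 1), ∑ j ∈ Finset.Ico (0 : ℤ) (2 * m + 1), f i j
      = 4 * ∑ j ∈ Finset.Ico (0 : ℤ) (m + 1), ∑ k ∈ Finset.Ico (0 : ℤ) m, f j k := by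
  have hT1 : ∑ i ∈ Finset.Ico (m + 1) (2 * m + 1), ∑ j ∈ Finset.Ico (0 : ℤ) (m + 1), f i j
      = ∑ i ∈ Finset.Ico (0 : ℤ) (m + 1), ∑ j ∈ Finset.Ico (0 : ℤ) m, f i j := by
    have h := rect_rot f (2 * m + 1) hrot 0 (m + 1) 0 m
    rw [show (2 * m + 1 : ℤ) - m = m + 1 by ring, show (2 * m + 1 : ℤ) - 0 = 2 * m + 1 by ring] at h
    exact h
  have hT2 : ∑ i ∈ Finset.Ico m (2 * m + 1), ∑ j ∈ Finset.Ico (m + 1) (2 * m + 1), f i j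
      = ∑ i ∈ Finset.Ico (m + 1) (2 * m + 1), ∑ j ∈ Finset.Ico (0 : ℤ) (m + 1), f i j := by
    have h := rect_rot f (2 * m + 1) hrot (m + 1) (2 * m + 1) 0 (m + 1)
    rw [show (2 * m + 1 : ℤ) - (m + 1) = m by ring, show (2 * m + 1 : ℤ) - 0 = 2 * m + 1 by ring] at h
    exact h
  have hT3 : ∑ i ∈ Finset.Ico (0 : ℤ) m, ∑ j ∈ Finset.Ico m (2 * m + 1), f i j
      = ∑ i ∈ Finset.Ico m (2 * m + 1), ∑ j ∈ Finset.Ico (m + 1) (2 * m + 1), f i j := by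
    have h := rect_rot f (2 * m + 1) hrot m (2 * m + 1) (m + 1) (2 * m + 1)
    rw [show (2 * m + 1 : ℤ) - (2 * m + 1) = 0 by ring, show (2 * m + 1 : ℤ) - (m + 1) = m by ring] at h
    exact h
  -- split the full square into columns [0,m), the column m, and columns [m+1, n)
  have e1 : ∑ i ∈ Finset.Ico (0 : ℤ) (2 * m + 1), ∑ j ∈ Finset.Ico (0 : ℤ) (2 * m + 1), f i j
      = (∑ i ∈ Finset.Ico (0 : ℤ) (2 * m + 1), ∑ j ∈ Finset.Ico (0 : ℤ) m, f i j)
        + ∑ i ∈ Finset.Ico (0 : ℤ) (2 * m + 1), ∑ j ∈ Finset.Ico m (2 * m + 1), f i j := by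
    rw [← Finset.sum_add_distrib]
    exact Finset.sum_congr rfl fun i _ => ico_split (f i) 0 m (2 * m + 1) (by omega) (by omega)
  have e2 : ∑ i ∈ Finset.Ico (0 : ℤ) (2 * m + 1), ∑ j ∈ Finset.Ico (0 : ℤ) m, f i j
      = (∑ i ∈ Finset.Ico (0 : ℤ) (m + 1), ∑ j ∈ Finset.Ico (0 : ℤ) m, f i j)
        + ∑ i ∈ Finset.Ico (m + 1) (2 * m + 1), ∑ j ∈ Finset.Ico (0 : ℤ) m, f i j :=
    ico_split _ 0 (m + 1) (2 * m + 1) (by omega) (by omega)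
  have e3 : ∑ i ∈ Finset.Ico (0 : ℤ) (2 * m + 1), ∑ j ∈ Finset.Ico m (2 * m + 1), f i j
      = (∑ i ∈ Finset.Ico (0 : ℤ) (2 * m + 1), f i m)
        + ∑ i ∈ Finset.Ico (0 : ℤ) (2 * m + 1), ∑ j ∈ Finset.Ico (m + 1) (2 * m + 1), f i j := by
    rw [← Finset.sum_add_distrib]
    refine Finset.sum_congr rfl fun i _ => ?_
    rw [ico_split (f i) m (m + 1) (2 * m + 1) (by omega) (by omega), ico_one]
  have e4 : ∑ i ∈ Finset.Ico (0 : ℤ) (2 * m + 1), f i m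
      = (∑ i ∈ Finset.Ico (0 : ℤ) m, f i m) + f m m
        + ∑ i ∈ Finset.Ico (m + 1) (2 * m + 1), f i m := by
    rw [ico_split (fun i => f i m) 0 m (2 * m + 1) (by omega) (by omega),
      ico_split (fun i => f i m) m (m + 1) (2 * m + 1) (by omega) (by omega),
      ico_one (fun i => f i m)]
    ring
  have e5 : ∑ i ∈ Finset.Ico (0 : ℤ) (2 * m + 1), ∑ j ∈ Finset.Ico (m + 1) (2 * m + 1), f i j
      = (∑ i ∈ Finset.Ico (0 : ℤ) m, ∑ j ∈ Finset.Ico (m + 1) (2 * m + 1), f i j)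
        + ∑ i ∈ Finset.Ico m (2 * m + 1), ∑ j ∈ Finset.Ico (m + 1) (2 * m + 1), f i j :=
    ico_split _ 0 m (2 * m + 1) (by omega) (by omega)
  -- reassemble T1 = X1 + (column-m part of rows (m, n)) and T3 = (column-m part of rows [0,m)) + T3'
  have e6 : ∑ i ∈ Finset.Ico (m + 1) (2 * m + 1), ∑ j ∈ Finset.Ico (0 : ℤ) (m + 1), f i j
      = (∑ i ∈ Finset.Ico (m + 1) (2 * m + 1), ∑ j ∈ Finset.Ico (0 : ℤ) m, f i j)
        + ∑ i ∈ Finset.Ico (m + 1) (2 * m + 1), f i m := by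
    rw [← Finset.sum_add_distrib]
    refine Finset.sum_congr rfl fun i _ => ?_
    rw [ico_split (f i) 0 m (m + 1) (by omega) (by omega), ico_one]
  have e7 : ∑ i ∈ Finset.Ico (0 : ℤ) m, ∑ j ∈ Finset.Ico m (2 * m + 1), f i j
      = (∑ i ∈ Finset.Ico (0 : ℤ) m, f i m)
        + ∑ i ∈ Finset.Ico (0 : ℤ) m, ∑ j ∈ Finset.Ico (m + 1) (2 * m + 1), f i j := by
    rw [← Finset.sum_add_distrib]
    refine Finset.sum_congr rfl fun i _ => ?_
    rw [ico_split (f i) m (m + 1) (2 * m + 1) (by omega) (by omega), ico_one]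
  linarith [hT1, hT2, hT3, e1, e2, e3, e4, e5, e6, e7, hc]

lemma quad_even (f : ℤ → ℤ → ℤ) (m : ℤ) (hm : 0 ≤ m)
    (hrot : ∀ i j, f (2 * m - 1 - j) i = f i j) :
    ∑ i ∈ Finset.Ico (0 : ℤ) (2 * m), ∑ j ∈ Finset.Ico (0 : ℤ) (2 * m), f i j
      = 4 * ∑ j ∈ Finset.Ico (0 : ℤ) m, ∑ k ∈ Finset.Ico (0 : ℤ) m, f j k := by
  have hT1 : ∑ i ∈ Finset.Ico m (2 * m), ∑ j ∈ Finset.Ico (0 : ℤ) m, f i j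
      = ∑ i ∈ Finset.Ico (0 : ℤ) m, ∑ j ∈ Finset.Ico (0 : ℤ) m, f i j := by
    have h := rect_rot f (2 * m) hrot 0 m 0 m
    rw [show (2 * m : ℤ) - m = m by ring, show (2 * m : ℤ) - 0 = 2 * m by ring] at h
    exact h
  have hT2 : ∑ i ∈ Finset.Ico m (2 * m), ∑ j ∈ Finset.Ico m (2 * m), f i j
      = ∑ i ∈ Finset.Ico m (2 * m), ∑ j ∈ Finset.Ico (0 : ℤ) m, f i j := by
    have h := rect_rot f (2 * m) hrot m (2 * m) 0 m
    rw [show (2 * m : ℤ) - m = m by ring, show (2 * m : ℤ) - 0 = 2 * m by ring] at h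
    exact h
  have hT3 : ∑ i ∈ Finset.Ico (0 : ℤ) m, ∑ j ∈ Finset.Ico m (2 * m), f i j
      = ∑ i ∈ Finset.Ico m (2 * m), ∑ j ∈ Finset.Ico m (2 * m), f i j := by
    have h := rect_rot f (2 * m) hrot m (2 * m) m (2 * m)
    rw [show (2 * m : ℤ) - (2 * m) = 0 by ring, show (2 * m : ℤ) - m = m by ring] at h
    exact h
  have e1 : ∑ i ∈ Finset.Ico (0 : ℤ) (2 * m), ∑ j ∈ Finset.Ico (0 : ℤ) (2 * m), f i j
      = (∑ i ∈ Finset.Ico (0 : ℤ) (2 * m), ∑ j ∈ Finset.Ico (0 : ℤ) m, f i j)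
        + ∑ i ∈ Finset.Ico (0 : ℤ) (2 * m), ∑ j ∈ Finset.Ico m (2 * m), f i j := by
    rw [← Finset.sum_add_distrib]
    exact Finset.sum_congr rfl fun i _ => ico_split (f i) 0 m (2 * m) (by omega) (by omega)
  have e2 : ∑ i ∈ Finset.Ico (0 : ℤ) (2 * m), ∑ j ∈ Finset.Ico (0 : ℤ) m, f i j
      = (∑ i ∈ Finset.Ico (0 : ℤ) m, ∑ j ∈ Finset.Ico (0 : ℤ) m, f i j)
        + ∑ i ∈ Finset.Ico m (2 * m), ∑ j ∈ Finset.Ico (0 : ℤ) m, f i j :=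
    ico_split _ 0 m (2 * m) (by omega) (by omega)
  have e3 : ∑ i ∈ Finset.Ico (0 : ℤ) (2 * m), ∑ j ∈ Finset.Ico m (2 * m), f i j
      = (∑ i ∈ Finset.Ico (0 : ℤ) m, ∑ j ∈ Finset.Ico m (2 * m), f i j)
        + ∑ i ∈ Finset.Ico m (2 * m), ∑ j ∈ Finset.Ico m (2 * m), f i j :=
    ico_split _ 0 m (2 * m) (by omega) (by omega)
  linarith [hT1, hT2, hT3, e1, e2, e3]

lemma alt_eq_sum (grid : List String) (n : Int) :
    min_operations_to_symmetric_grid_alt grid n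
      = PySem.Int.floordiv
          (∑ i ∈ Finset.Ico (0 : ℤ) n, ∑ j ∈ Finset.Ico (0 : ℤ) n, pvCost grid n i j) 4 := by
  unfold min_operations_to_symmetric_grid_alt
  congr 1
  have h : ∀ (tot i j : ℤ),
      (let b := pvOrbitOnes grid n i j; tot + min b (4 - b)) = tot + pvCost grid n i j := by
    intro tot i j
    dsimp only
    rw [min_eq_cost]
  calc (PySem.List.pyRange 0 n 1).foldl (fun tot i =>
          (PySem.List.pyRange 0 n 1).foldl (fun tot j =>
            let b := pvOrbitOnes grid n i j
            tot + min b (4 - b)) tot) 0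
      = (PySem.List.pyRange 0 n 1).foldl (fun tot i =>
          (PySem.List.pyRange 0 n 1).foldl (fun tot j => tot + pvCost grid n i j) tot) 0 := by
        refine PySem.List.foldl_congr_mem _ _ _ _ (fun acc i _ => ?_)
        exact PySem.List.foldl_congr_mem _ _ _ _ (fun acc2 j _ => h acc2 i j)
    _ = _ := double_loop (pvCost grid n) n n

lemma a_eq_quad_sum (grid : List String) (n J K : Int) :
    (PySem.List.pyRange 0 J 1).foldl (fun ans j =>
      (PySem.List.pyRange 0 K 1).foldl (fun ans k =>
        let b := pvCountFlips grid n j k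
        if b = 1 ∨ b = 3 then ans + 1 else if b = 2 then ans + 2 else ans) ans) 0
      = ∑ j ∈ Finset.Ico (0 : ℤ) J, ∑ k ∈ Finset.Ico (0 : ℤ) K, pvCost grid n j k := by
  have h : ∀ (ans j k : ℤ),
      (let b := pvCountFlips grid n j k
       if b = 1 ∨ b = 3 then ans + 1 else if b = 2 then ans + 2 else ans)
        = ans + pvCost grid n j k := by
    intro ans j k
    dsimp only
    unfold pvCost
    split_ifs <;> ring
  calc (PySem.List.pyRange 0 J 1).foldl (fun ans j =>
          (PySem.List.pyRange 0 K 1).foldl (fun ans k =>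
            let b := pvCountFlips grid n j k
            if b = 1 ∨ b = 3 then ans + 1 else if b = 2 then ans + 2 else ans) ans) 0
      = (PySem.List.pyRange 0 J 1).foldl (fun ans j =>
          (PySem.List.pyRange 0 K 1).foldl (fun ans k => ans + pvCost grid n j k) ans) 0 := by
        refine PySem.List.foldl_congr_mem _ _ _ _ (fun acc j _ => ?_)
        exact PySem.List.foldl_congr_mem _ _ _ _ (fun acc2 k _ => h acc2 j k)
    _ = _ := double_loop (pvCost grid n) J K

lemma floordiv_four_mul (s : ℤ) : PySem.Int.floordiv (4 * s) 4 = s := by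
  rw [PySem.Int.floordiv_eq_ediv_of_pos (by norm_num)]
  omega

lemma ports_agree (grid : List String) (n : Int) :
    min_operations_to_symmetric_grid grid n = min_operations_to_symmetric_grid_alt grid n := by
  rw [alt_eq_sum]
  unfold min_operations_to_symmetric_grid
  have hmod := PySem.Int.mod_eq_emod_of_pos (a := n) (b := 2) (by norm_num)
  by_cases hodd : PySem.Int.mod n 2 = 1
  · rw [if_pos hodd]
    rw [a_eq_quad_sum]
    obtain ⟨m, hmn⟩ : ∃ m, n = 2 * m + 1 := by
      refine ⟨(n - 1) / 2, ?_⟩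
      rw [hmod] at hodd
      omega
    subst hmn
    have hJ : (2 * m + 1 + 1) / 2 = m + 1 := by omega
    have hK : (2 * m + 1 - 1) / 2 = m := by omega
    rw [hJ, hK]
    by_cases hm : 0 ≤ m
    · rw [quad_odd (pvCost grid (2 * m + 1)) m hm
        (fun i j => cost_rot grid (2 * m + 1) i j) (cost_center grid m)]
      rw [floordiv_four_mul]
    · have h1 : Finset.Ico (0 : ℤ) (m + 1) = ∅ := by
        rw [Finset.Ico_eq_empty_iff]; omega
      have h2 : Finset.Ico (0 : ℤ) (2 * m + 1) = ∅ := by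
        rw [Finset.Ico_eq_empty_iff]; omega
      rw [h1, h2]
      simp [PySem.Int.floordiv]
  · rw [if_neg hodd]
    rw [a_eq_quad_sum]
    obtain ⟨m, hmn⟩ : ∃ m, n = 2 * m := by
      refine ⟨n / 2, ?_⟩
      rw [hmod] at hodd
      omega
    subst hmn
    have hJ : (2 * m) / 2 = m := by omega
    rw [hJ]
    by_cases hm : 0 ≤ m
    · rw [quad_even (pvCost grid (2 * m)) m hm
        (fun i j => cost_rot grid (2 * m) i j)]
      rw [floordiv_four_mul]
    · have h1 : Finset.Ico (0 : ℤ) m = ∅ := by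
        rw [Finset.Ico_eq_empty_iff]; omega
      have h2 : Finset.Ico (0 : ℤ) (2 * m) = ∅ := by
        rw [Finset.Ico_eq_empty_iff]; omega
      rw [h1, h2]
      simp [PySem.Int.floordiv]

-- ===== VERDICT (by name: the statement is the Claim_ definition above) =====
theorem min_operations_to_symmetric_grid_spec : Claim_equal_min_operations_to_symmetric_grid := by
  intro grid n _ _
  exact ports_agree grid n
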